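-- pv_equiv track=rewrite | github.com/nullkalahar/trama | src/trama/tooling_runtime.py | _normalizar_path_openapi
-- ===== SOURCE A (Python) =====
-- def _normalizar_path_openapi(path: str) -> str:
--     chunks = [c for c in str(path).split("/") if c]
--     out: list[str] = []
--     for ch in chunks:
--         if ch.startswith(":") and len(ch) > 1:
--             out.append("{" + ch[1:] + "}")
--         else:
--             out.append(ch)
--     return "/" + "/".join(out)
-- ===== SOURCE B (Python) =====
-- def _normalizar_path_openapi(path: str) -> str:
--     out = ""
--     seg = ""
--     for c in str(path) + "/":
--         if c == "/":
--             if seg: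
--                 if seg.startswith(":") and len(seg) > 1:
--                     seg = "{" + seg[1:] + "}"
--                 out += "/" + seg
--                 seg = ""
--         else:
--             seg += c
--     return out or "/"
-- ===== Notes on version B (the rewrite author's own statement) =====
-- stated objective: alternative
-- what changed: Replaces the split/filter/append-loop/join pipeline with a single-pass character scanner that maintains only the output string and the current segment, flushing each segment (with the :param -> {param} rewrite) when a slash or the end is reached.
import Mathlib
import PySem

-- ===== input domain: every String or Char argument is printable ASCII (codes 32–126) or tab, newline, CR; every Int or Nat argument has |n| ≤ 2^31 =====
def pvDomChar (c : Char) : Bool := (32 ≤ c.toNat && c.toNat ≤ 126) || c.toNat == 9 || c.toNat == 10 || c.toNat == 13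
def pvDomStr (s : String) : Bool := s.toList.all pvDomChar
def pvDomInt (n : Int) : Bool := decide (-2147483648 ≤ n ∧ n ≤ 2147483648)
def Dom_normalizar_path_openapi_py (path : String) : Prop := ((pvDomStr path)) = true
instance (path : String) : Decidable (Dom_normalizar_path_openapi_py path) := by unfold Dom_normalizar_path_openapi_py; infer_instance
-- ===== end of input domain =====

-- B replaces A's split/filter/loop/join pipeline by a single-pass character scanner (same cost, different structure).


-- ===== PORT A =====
-- chunks = [c for c in path.split("/") if c]; for ch in chunks: append "{"+ch[1:]+"}" or ch; "/" + "/".join(out)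
def normalizar_path_openapi_py (path : String) : String :=
  let chunks := (PySem.Chars.splitOn path.toList ['/']).filter (fun c => decide (c ≠ []))
  let out := chunks.foldl
    (fun (out : List (List Char)) ch =>
      if PySem.Chars.startswith ch [':'] && decide (1 < ch.length)
      then out ++ [['{'] ++ PySem.List.slice ch (some 1) none ++ ['}']]
      else out ++ [ch]) []
  String.ofList ('/' :: PySem.Chars.join ['/'] out)

-- ===== PORT B =====
-- B's loop body: on '/', flush the pending segment (rewritten if it is ':name'); otherwise extend the segment.
def pvStepB (st : List Char × List Char) (c : Char) : List Char × List Char :=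
  if c = '/' then
    if st.2 ≠ [] then
      (st.1 ++ '/' ::
        (if PySem.Chars.startswith st.2 [':'] && decide (1 < st.2.length)
         then ['{'] ++ PySem.List.slice st.2 (some 1) none ++ ['}'] else st.2), [])
    else st
  else (st.1, st.2 ++ [c])

def normalizar_path_openapi_py_alt (path : String) : String :=
  let r := (path.toList ++ ['/']).foldl pvStepB ([], [])
  String.ofList (if r.1 = [] then ['/'] else r.1)

-- ===== PRECONDITION & SPEC =====
def Spec_normalizar_path_openapi_py (path : String) (out : String) : Prop := out = normalizar_path_openapi_py_alt path
instance (path : String) (out : String) : Decidable (Spec_normalizar_path_openapi_py path out) := by unfold Spec_normalizar_path_openapi_py; infer_instance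

-- ===== CLAIM (what is proved, stated in full; the proofs are below) =====
def Claim_equal_normalizar_path_openapi_py : Prop := ∀ (path : String), Dom_normalizar_path_openapi_py path → Spec_normalizar_path_openapi_py path (normalizar_path_openapi_py path)

-- ===== LEMMAS AND PROOFS =====

-- the ':name' → '{name}' rewrite both programs apply to a chunk
def pvTr (ch : List Char) : List Char :=
  if PySem.Chars.startswith ch [':'] && decide (1 < ch.length)
  then ['{'] ++ PySem.List.slice ch (some 1) none ++ ['}'] else ch

-- split on '/' with a pending (forward) segment: the common segmentation both sides compute
def pvSp : List Char → List Char → List (List Char)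
  | [], cur => [cur]
  | c :: rest, cur => if c = '/' then cur :: pvSp rest [] else pvSp rest (cur ++ [c])

-- the body B emits for a chunk list
def pvBody (cs : List (List Char)) : List Char :=
  (cs.filter (fun ch => decide (ch ≠ []))).flatMap (fun ch => '/' :: pvTr ch)

theorem pvGo (fuel : Nat) : ∀ (l cur acc : List _), l.length ≤ fuel →
    PySem.Chars.splitOn.go ['/'] fuel l cur acc = acc.reverse ++ pvSp l cur.reverse := by
  induction fuel with
  | zero =>
    intro l cur acc h
    have hl : l = [] := by cases l <;> simp_all
    subst hl
    simp [PySem.Chars.splitOn.go, pvSp]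
  | succ n ih =>
    intro l cur acc h
    cases l with
    | nil => simp [PySem.Chars.splitOn.go, pvSp]
    | cons c rest =>
      by_cases hc : c = '/'
      · subst hc
        rw [PySem.Chars.splitOn.go]
        simp only [List.isPrefixOf, BEq.rfl, Bool.true_and, if_pos]
        rw [ih _ _ _ (by simpa using h)]
        simp [pvSp]
      · rw [PySem.Chars.splitOn.go]
        have : [('/' : Char)].isPrefixOf (c :: rest) = false := by
          simp [List.isPrefixOf]; exact fun h' => (hc h'.symm).elim
        rw [if_neg (by simp [this])]
        rw [ih _ _ _ (by simpa using h)]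
        simp [pvSp, hc]

theorem pvSplitOn (l : List Char) : PySem.Chars.splitOn l ['/'] = pvSp l [] := by
  rw [PySem.Chars.splitOn, pvGo (l.length + 1) l [] [] (by omega)]
  rfl

theorem pvFoldB : ∀ (l out seg : List Char),
    (l ++ ['/']).foldl pvStepB (out, seg) = (out ++ pvBody (pvSp l seg), []) := by
  intro l
  induction l with
  | nil =>
    intro out seg
    by_cases hs : seg = []
    · subst hs; simp [pvStepB, pvBody, pvSp]
    · simp [pvStepB, hs, pvBody, pvSp, pvTr]
  | cons c rest ih =>
    intro out seg
    by_cases hc : c = '/'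
    · subst hc
      by_cases hs : seg = []
      · subst hs
        simp only [List.cons_append, List.foldl_cons]
        rw [show pvStepB (out, []) '/' = (out, []) by simp [pvStepB], ih]
        simp [pvSp, pvBody]
      · simp only [List.cons_append, List.foldl_cons]
        rw [show pvStepB (out, seg) '/' = (out ++ '/' :: pvTr seg, []) by simp [pvStepB, hs, pvTr], ih]
        simp [pvSp, pvBody, hs]
    · simp only [List.cons_append, List.foldl_cons]
      rw [show pvStepB (out, seg) c = (out, seg ++ [c]) by simp [pvStepB, hc], ih]
      simp [pvSp, hc]

theorem pvJoinFlat : ∀ (d : List Char) (ds : List (List Char)),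
    PySem.Chars.join ['/'] (d :: ds) = d ++ ds.flatMap (fun e => '/' :: e) := by
  intro d ds
  induction ds generalizing d with
  | nil => simp [PySem.Chars.join_singleton]
  | cons e es ih => rw [PySem.Chars.join_cons_cons, ih e]; simp

theorem pvJoin (ds : List (List Char)) :
    ('/' :: PySem.Chars.join ['/'] ds) =
      (if ds.flatMap (fun d => '/' :: d) = [] then ['/'] else ds.flatMap (fun d => '/' :: d)) := by
  cases ds with
  | nil => simp [PySem.Chars.join_nil]
  | cons d es => rw [pvJoinFlat]; simp

theorem pvAfoldl (cs : List (List Char)) (out : List (List Char)) :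
    cs.foldl
      (fun (out : List (List Char)) ch =>
        if PySem.Chars.startswith ch [':'] && decide (1 < ch.length)
        then out ++ [['{'] ++ PySem.List.slice ch (some 1) none ++ ['}']]
        else out ++ [ch]) out = out ++ cs.map pvTr := by
  have h : (fun (out : List (List Char)) ch =>
        if PySem.Chars.startswith ch [':'] && decide (1 < ch.length)
        then out ++ [['{'] ++ PySem.List.slice ch (some 1) none ++ ['}']]
        else out ++ [ch]) = fun (out : List (List Char)) ch => out ++ [pvTr ch] := by
    funext o ch; unfold pvTr; split <;> rfl
  rw [h, PySem.List.foldl_append_singleton_eq_map]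

-- ===== VERDICT (by name: the statement is the Claim_ definition above) =====
theorem normalizar_path_openapi_py_spec : Claim_equal_normalizar_path_openapi_py := by
  intro path _
  unfold Spec_normalizar_path_openapi_py normalizar_path_openapi_py normalizar_path_openapi_py_alt
  dsimp only
  rw [pvSplitOn, pvAfoldl, pvFoldB path.toList [] []]
  simp only [List.nil_append]
  rw [pvJoin]
  have hb : (((pvSp path.toList []).filter (fun c => decide (c ≠ []))).map pvTr).flatMap
      (fun d => '/' :: d) = pvBody (pvSp path.toList []) := by
    unfold pvBody
    rw [List.flatMap_map]
  rw [hb]
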